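-- pv_equiv track=rewrite | github.com/ShashankBejjanki1241/SJAS | agents/selector_agent.py | _fuzzy_match_tags
-- ===== SOURCE A (Python) =====
-- from typing import Tuple, Optional
--
-- def _fuzzy_match_tags(query: str, job_map: dict) -> Optional[str]:
--     """
--     Fuzzy match query against tags in job_map.
--     Enhanced with better matching logic.
--
--     Args:
--         query: Lowercase query string
--         job_map: Job map dictionary
--
--     Returns:
--         Matched category name or None
--     """
--     query_words = set(query.split())
--
--     best_match = None
--     best_score = 0
--
--     for category, data in job_map.items():
--         if category == "default":
--             continue
--
--         tags = data.get("tags", [])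
--         if not tags:
--             continue
--
--         # Priority 1: Check if category name appears in query (highest priority)
--         if category in query_words:
--             return category
--
--         # Priority 2: Check if any tag matches query words
--         tag_words = set()
--         for tag in tags:
--             tag_words.update(tag.lower().split())
--
--         # Calculate match score (number of matching words)
--         match_score = len(query_words.intersection(tag_words))
--
--         # Enhanced: Check for semantic matches
--         # "developer" matches "python", "backend"
--         # "engineer" matches "data", "backend"
--         semantic_matches = {
--             "developer": ["python", "backend"],
--             "engineer": ["data", "backend"],
--             "analyst": ["data"],
--             "programmer": ["python", "backend"]
--         }
--
--         for semantic_word, categories in semantic_matches.items():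
--             if semantic_word in query_words and category in categories:
--                 match_score += 2  # Boost score for semantic match
--
--         if match_score > best_score:
--             best_score = match_score
--             best_match = category
--
--     return best_match if best_score > 0 else None
-- ===== SOURCE B (Python) =====
-- def _fuzzy_match_tags(query, job_map):
--     """Query-major rescoring: collect eligible categories once (returning early on
--     an exact name hit), then build a parallel score array by sweeping query words
--     and semantic entries over it, and pick the first strict maximum by index."""
--     query_words = set(query.split())
--
--     # One pass over job_map: keep (category, flat lowercased tag-word list) for
--     # scorable categories; an exact category-name hit returns immediately.
--     eligible = []
--     for category, data in job_map.items():
--         if category == "default":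
--             continue
--         tags = data.get("tags", [])
--         if not tags:
--             continue
--         if category in query_words:
--             return category
--         words = []
--         for tag in tags:
--             words = words + tag.lower().split()
--         eligible.append((category, words))
--
--     # Transposed scoring: outer loop over query words, inner sweep over categories.
--     scores = [0] * len(eligible)
--     for qw in query_words:
--         scores = [s + 1 if qw in e[1] else s for s, e in zip(scores, eligible)]
--
--     semantic_matches = {
--         "developer": ["python", "backend"],
--         "engineer": ["data", "backend"],
--         "analyst": ["data"],
--         "programmer": ["python", "backend"],
--     }
--     for semantic_word, cats in semantic_matches.items():
--         if semantic_word in query_words: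
--             scores = [s + 2 if e[0] in cats else s for s, e in zip(scores, eligible)]
--
--     best_i, best_score = -1, 0
--     for i, s in enumerate(scores):
--         if s > best_score:
--             best_i, best_score = i, s
--     return eligible[best_i][0] if best_i >= 0 else None
-- ===== Notes on version B (the rewrite author's own statement) =====
-- stated objective: alternative
-- what changed: A scores each category in place with a per-category tag-word set intersection and a running (best_match, best_score) pair; B first collects the eligible categories with flat word lists in one pass, then builds a parallel score array by query-major sweeps (one sweep per query word, one per semantic entry), and finally picks the first strict maximum by index.
import Mathlib
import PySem

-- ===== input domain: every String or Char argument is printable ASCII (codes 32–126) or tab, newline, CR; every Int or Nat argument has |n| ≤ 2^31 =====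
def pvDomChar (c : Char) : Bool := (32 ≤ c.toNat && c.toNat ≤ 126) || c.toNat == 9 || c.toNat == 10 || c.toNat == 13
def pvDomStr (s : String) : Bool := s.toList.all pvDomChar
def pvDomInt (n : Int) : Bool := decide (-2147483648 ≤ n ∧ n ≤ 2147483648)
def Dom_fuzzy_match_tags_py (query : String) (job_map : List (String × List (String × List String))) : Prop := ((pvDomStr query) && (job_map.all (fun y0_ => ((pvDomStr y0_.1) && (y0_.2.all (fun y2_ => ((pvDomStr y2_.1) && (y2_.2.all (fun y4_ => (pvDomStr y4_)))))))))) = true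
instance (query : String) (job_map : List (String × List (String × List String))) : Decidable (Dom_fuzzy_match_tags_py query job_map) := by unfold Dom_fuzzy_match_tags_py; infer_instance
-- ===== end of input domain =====

-- B replaces A's per-category set-intersection scoring loop with a collect-then-sweep scheme
-- (eligible list built once, query-major score array, index-based argmax): an alternative
-- decomposition of the same cost; return values proved equal on every input.


-- the semantic_matches literal both Pythons contain
def pvSemMatches : List (String × List String) :=
  [("developer", ["python", "backend"]),
   ("engineer", ["data", "backend"]),
   ("analyst", ["data"]),
   ("programmer", ["python", "backend"])]

-- ===== PORT A =====
-- tag_words = set(); for tag in tags: tag_words.update(tag.lower().split())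
def pvTagWordsA (tags : List String) : PySem.Set String :=
  tags.foldl (fun s t => PySem.Set.update s (PySem.Str.split₀ (PySem.Str.lower t))) PySem.Set.empty

-- A's for-loop over job_map.items() with (best_match, best_score) state and early return
def pvLoopA (qws : PySem.Set String) :
    List (String × List (String × List String)) → Option String → Int → Option String
  | [], best, bs => if bs > 0 then best else none
  | (category, data) :: rest, best, bs =>
    if category = "default" then pvLoopA qws rest best bs
    else
      let tags := (PySem.Dict.mk data).getD "tags" []
      if tags.isEmpty then pvLoopA qws rest best bs
      else if qws.contains category then some category
      else
        let tws := pvTagWordsA tags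
        let ms0 : Int := PySem.Set.len (PySem.Set.inter qws tws)
        let ms := pvSemMatches.foldl
          (fun m p => if qws.contains p.1 && p.2.contains category then m + 2 else m) ms0
        if ms > bs then pvLoopA qws rest (some category) ms
        else pvLoopA qws rest best bs

def fuzzy_match_tags_py (query : String) (job_map : List (String × List (String × List String))) : Option String :=
  pvLoopA (PySem.Set.ofList (PySem.Str.split₀ query)) job_map none 0

-- ===== PORT B =====
-- words = []; for tag in tags: words = words + tag.lower().split()
def pvFlatWordsB (tags : List String) : List String :=
  tags.foldl (fun ws t => ws ++ PySem.Str.split₀ (PySem.Str.lower t)) []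

-- B's first loop: eligible accumulator, early .inl return on an exact name hit
def pvCollectB (qws : PySem.Set String) :
    List (String × List (String × List String)) → List (String × List String) →
    String ⊕ List (String × List String)
  | [], acc => .inr acc
  | (category, data) :: rest, acc =>
    if category = "default" then pvCollectB qws rest acc
    else
      let tags := (PySem.Dict.mk data).getD "tags" []
      if tags.isEmpty then pvCollectB qws rest acc
      else if qws.contains category then .inl category
      else pvCollectB qws rest (acc ++ [(category, pvFlatWordsB tags)])

def fuzzy_match_tags_py_alt (query : String) (job_map : List (String × List (String × List String))) : Option String :=
  let qws : PySem.Set String := PySem.Set.ofList (PySem.Str.split₀ query)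
  match pvCollectB qws job_map [] with
  | .inl c => some c
  | .inr elig =>
    let scores0 : List Int := List.replicate elig.length 0
    let scores1 := qws.foldl
      (fun sc qw => List.zipWith (fun s e => if (e.2 : List String).contains qw then s + 1 else s) sc elig)
      scores0
    let scores2 := pvSemMatches.foldl
      (fun sc p => if qws.contains p.1 then
          List.zipWith (fun s e => if p.2.contains e.1 then s + 2 else s) sc elig
        else sc)
      scores1
    let best := (PySem.List.enumerate scores2).foldl
      (fun (b : Int × Int) is => if is.2 > b.2 then (is.1, is.2) else b) (-1, 0)
    if best.1 ≥ 0 then (PySem.List.pyGet? elig best.1).map (fun e => e.1) else none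

-- ===== PRECONDITION & SPEC =====
def Spec_fuzzy_match_tags_py (query : String) (job_map : List (String × List (String × List String))) (out : Option String) : Prop := out = fuzzy_match_tags_py_alt query job_map
instance (query : String) (job_map : List (String × List (String × List String))) (out : Option String) : Decidable (Spec_fuzzy_match_tags_py query job_map out) := by unfold Spec_fuzzy_match_tags_py; infer_instance

-- ===== CLAIM (what is proved, stated in full; the proofs are below) =====
def Claim_equal_fuzzy_match_tags_py : Prop := ∀ (query : String) (job_map : List (String × List (String × List String))), Dom_fuzzy_match_tags_py query job_map → Spec_fuzzy_match_tags_py query job_map (fuzzy_match_tags_py query job_map)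

-- ===== LEMMAS AND PROOFS =====

-- the per-category score both programs compute, in one closed form
def pvScoreOf (qws : PySem.Set String) (e : String × List String) : Int :=
  pvSemMatches.foldl
    (fun m p => if qws.contains p.1 && p.2.contains e.1 then m + 2 else m)
    ((qws.countP (fun qw => e.2.contains qw) : Nat) : Int)

lemma mem_foldl_update (w : String → List String) (y : String) :
    ∀ (tags : List String) (s : PySem.Set String),
      y ∈ tags.foldl (fun s t => PySem.Set.update s (w t)) s ↔ y ∈ s ∨ ∃ t ∈ tags, y ∈ w t := by
  intro tags
  induction tags with
  | nil => simp [List.foldl]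
  | cons t ts ih =>
    intro s
    simp [List.foldl, ih, PySem.Set.mem_update]
    tauto



lemma mem_tagWordsA (tags : List String) (y : String) :
    y ∈ pvTagWordsA tags ↔ y ∈ pvFlatWordsB tags := by
  unfold pvTagWordsA pvFlatWordsB
  rw [PySem.List.foldl_append_eq_flatMap, mem_foldl_update]
  simp [PySem.Set.empty, List.mem_flatMap]

lemma score_base_eq (qws : PySem.Set String) (tags : List String) :
    PySem.Set.len (PySem.Set.inter qws (pvTagWordsA tags))
      = ((qws.countP (fun qw => (pvFlatWordsB tags).contains qw) : Nat) : Int) := by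
  unfold PySem.Set.len PySem.Set.inter
  norm_cast
  rw [← List.countP_eq_length_filter]
  apply List.countP_congr
  intro qw _
  simp [PySem.Set.contains, List.contains_eq_mem, mem_tagWordsA]

lemma zipWith_zipWith_same {α β : Type} (f h : β → α → β) :
    ∀ (sc : List β) (elig : List α),
      List.zipWith f (List.zipWith h sc elig) elig = List.zipWith (fun s e => f (h s e) e) sc elig := by
  intro sc
  induction sc with
  | nil => simp
  | cons a l ih => intro elig; cases elig with
    | nil => simp
    | cons b m => simp [List.zipWith, ih]

lemma zipWith_fst {α β : Type} :
    ∀ (sc : List β) (elig : List α), sc.length = elig.length →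
      List.zipWith (fun s _ => s) sc elig = sc := by
  intro sc
  induction sc with
  | nil => simp
  | cons a l ih => intro elig h; cases elig with
    | nil => simp at h
    | cons b m => simp_all

lemma foldl_zipWith_fuse {γ : Type} (g : γ → Int → (String × List String) → Int) :
    ∀ (L : List γ) (sc : List Int) (elig : List (String × List String)),
      sc.length = elig.length →
      L.foldl (fun sc p => List.zipWith (fun s e => g p s e) sc elig) sc
        = List.zipWith (fun s e => L.foldl (fun m p => g p m e) s) sc elig := by
  intro L
  induction L with
  | nil => intro sc elig h; simp [List.foldl]; exact (zipWith_fst sc elig h).symm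
  | cons p L ih =>
    intro sc elig h
    simp only [List.foldl]
    rw [ih _ _ (by simp [List.length_zipWith, h]), zipWith_zipWith_same]



lemma sem_fuse (qws : PySem.Set String) :
    ∀ (L : List (String × List String)) (sc : List Int) (elig : List (String × List String)),
      sc.length = elig.length →
      L.foldl (fun sc p => if qws.contains p.1 then
          List.zipWith (fun s e => if p.2.contains e.1 then s + 2 else s) sc elig
        else sc) sc
        = List.zipWith (fun s e =>
            L.foldl (fun m p => if qws.contains p.1 && p.2.contains e.1 then m + 2 else m) s) sc elig := by
  intro L
  induction L with
  | nil => intro sc elig h; simp only [List.foldl]; exact (zipWith_fst sc elig h).symm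
  | cons p L ih =>
    intro sc elig h
    simp only [List.foldl]
    by_cases hc : qws.contains p.1
    · simp only [hc, if_true]
      rw [ih _ _ (by simp [List.length_zipWith, h]), zipWith_zipWith_same]
      simp
    · rw [if_neg hc, ih _ _ h]
      simp only [Bool.not_eq_true] at hc
      simp only [hc, Bool.false_and, Bool.false_eq_true, if_false]

lemma zipWith_replicate {α β : Type} (f : Int → α → β) (c : Int) :
    ∀ (xs : List α), List.zipWith f (List.replicate xs.length c) xs = xs.map (f c) := by
  intro xs
  induction xs with
  | nil => simp
  | cons a l ih => simp [List.replicate, ih]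

lemma scores_eq (qws : PySem.Set String) (elig : List (String × List String)) :
    (pvSemMatches.foldl
      (fun sc p => if qws.contains p.1 then
          List.zipWith (fun s e => if p.2.contains e.1 then s + 2 else s) sc elig
        else sc)
      (qws.foldl
        (fun sc qw => List.zipWith (fun s e => if (e.2 : List String).contains qw then s + 1 else s) sc elig)
        (List.replicate elig.length (0 : Int))))
      = elig.map (pvScoreOf qws) := by
  rw [foldl_zipWith_fuse (fun qw s e => if (e.2 : List String).contains qw then s + 1 else s) qws
        _ elig (by simp),
      sem_fuse qws _ _ elig (by simp [List.length_zipWith]),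
      zipWith_zipWith_same, zipWith_replicate]
  apply List.map_congr_left
  intro e _
  rw [PySem.List.foldl_count_if]
  simp only [pvScoreOf, zero_add]

lemma sel_eq (score : (String × List String) → Int) :
    ∀ (l full : List (String × List String)) (k : Nat) (bi bs : Int) (best : Option String),
      full.drop k = l →
      ((bi = -1 ∧ best = none ∧ bs = 0) ∨
        (0 ≤ bi ∧ bi.toNat < k ∧ bs > 0 ∧
          ∃ p, full[bi.toNat]? = some p ∧ best = some p.1)) →
      (let r := (PySem.List.enumerate (l.map score) (k : Int)).foldl
          (fun (b : Int × Int) is => if is.2 > b.2 then (is.1, is.2) else b) (bi, bs)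
       if r.1 ≥ 0 then (PySem.List.pyGet? full r.1).map (fun e => e.1) else none)
        = (let f := l.foldl
            (fun (b : Option String × Int) e => if score e > b.2 then (some e.1, score e) else b)
            (best, bs)
           if f.2 > 0 then f.1 else none) := by
  intro l
  induction l with
  | nil =>
    intro full k bi bs best hdrop hinv
    simp only [List.map, PySem.List.enumerate, List.foldl]
    rcases hinv with ⟨h1, h2, h3⟩ | ⟨h1, h2, h3, p, hp, hb⟩
    · subst h1 h2 h3; norm_num
    · rw [if_pos (show bi ≥ (0:Int) from h1), if_pos h3, hb,
          show bi = ((bi.toNat : Nat) : Int) from (Int.toNat_of_nonneg h1).symm,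
          PySem.List.pyGet?_natCast, hp]
      rfl
  | cons e l ih =>
    intro full k bi bs best hdrop hinv
    have hfk : full[k]? = some e := by
      have h0 : (full.drop k)[0]? = some e := by rw [hdrop]; rfl
      rwa [List.getElem?_drop, Nat.add_zero] at h0
    have hdrop' : full.drop (k + 1) = l := by
      rw [← List.tail_drop, hdrop]
      rfl
    simp only [List.map, PySem.List.enumerate_cons, List.foldl]
    by_cases hgt : score e > bs
    · rw [if_pos hgt, if_pos hgt]
      have hcast : (k : Int) + 1 = ((k + 1 : Nat) : Int) := by push_cast; ring
      rw [hcast]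
      apply ih full (k + 1)
      · exact hdrop'
      · right
        refine ⟨by positivity, ?_, ?_, e, ?_, rfl⟩
        · simp
        · rcases hinv with ⟨_, _, h3⟩ | ⟨_, _, h3, _⟩ <;> omega
        · simpa using hfk
    · rw [if_neg hgt, if_neg hgt]
      have hcast : (k : Int) + 1 = ((k + 1 : Nat) : Int) := by push_cast; ring
      rw [hcast]
      apply ih full (k + 1) bi bs best hdrop'
      rcases hinv with ⟨h1, h2, h3⟩ | ⟨h1, h2, h3, p, hp, hb⟩
      · exact Or.inl ⟨h1, h2, h3⟩
      · exact Or.inr ⟨h1, by omega, h3, p, hp, hb⟩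



lemma collectB_acc (qws : PySem.Set String) :
    ∀ (jm : List (String × List (String × List String))) (acc : List (String × List String)),
      pvCollectB qws jm acc = Sum.map id (fun r => acc ++ r) (pvCollectB qws jm []) := by
  intro jm
  induction jm with
  | nil => intro acc; simp [pvCollectB]
  | cons cd rest ih =>
    intro acc
    obtain ⟨category, data⟩ := cd
    simp only [pvCollectB]
    split_ifs with h1 h2 h3
    · exact ih acc
    · exact ih acc
    · rfl
    · rw [ih (acc ++ _), ih ([] ++ _)]
      cases hc : pvCollectB qws rest [] <;> simp

lemma score_eq_full (qws : PySem.Set String) (category : String) (tags : List String) :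
    pvSemMatches.foldl
        (fun m p => if qws.contains p.1 && p.2.contains category then m + 2 else m)
        (PySem.Set.len (PySem.Set.inter qws (pvTagWordsA tags)))
      = pvScoreOf qws (category, pvFlatWordsB tags) := by
  rw [score_base_eq]
  rfl

lemma loopA_eq (qws : PySem.Set String) :
    ∀ (jm : List (String × List (String × List String))) (best : Option String) (bs : Int),
      pvLoopA qws jm best bs =
        (match pvCollectB qws jm [] with
        | .inl c => some c
        | .inr elig =>
          let f := elig.foldl
            (fun (b : Option String × Int) e => if pvScoreOf qws e > b.2 then (some e.1, pvScoreOf qws e) else b)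
            (best, bs)
          if f.2 > 0 then f.1 else none) := by
  intro jm
  induction jm with
  | nil => intro best bs; simp [pvLoopA, pvCollectB, List.foldl]
  | cons cd rest ih =>
    intro best bs
    obtain ⟨category, data⟩ := cd
    simp only [pvLoopA, pvCollectB]
    split_ifs with h1 h2 h3 h4
    · exact ih best bs
    · exact ih best bs
    · rfl
    · -- taken branch: ms > bs
      rw [ih (some category) _,
          collectB_acc qws rest ([] ++ [(category, pvFlatWordsB ((PySem.Dict.mk data).getD "tags" []))])]
      rw [score_eq_full] at h4
      cases hc : pvCollectB qws rest [] with
      | inl c => rfl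
      | inr r => rw [score_eq_full]; simp [List.foldl, h4]
    · rw [ih best bs,
          collectB_acc qws rest ([] ++ [(category, pvFlatWordsB ((PySem.Dict.mk data).getD "tags" []))])]
      rw [score_eq_full] at h4
      cases hc : pvCollectB qws rest [] with
      | inl c => rfl
      | inr r => simp [List.foldl, h4]

-- ===== VERDICT (by name: the statement is the Claim_ definition above) =====
theorem fuzzy_match_tags_py_spec : Claim_equal_fuzzy_match_tags_py := by
  intro query job_map _
  unfold Spec_fuzzy_match_tags_py fuzzy_match_tags_py fuzzy_match_tags_py_alt
  dsimp only
  rw [loopA_eq]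
  cases hc : pvCollectB (PySem.Set.ofList (PySem.Str.split₀ query)) job_map [] with
  | inl c => rfl
  | inr elig =>
    simp only [scores_eq]
    have h := sel_eq (pvScoreOf (PySem.Set.ofList (PySem.Str.split₀ query))) elig elig 0 (-1) 0 none
      rfl (Or.inl ⟨rfl, rfl, rfl⟩)
    simpa using h.symm
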